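-- pv_equiv track=rewrite | github.com/eprifti/audio2decodeMorse | analyses/add_predictions.py | infer_model_type
-- ===== SOURCE A (Python) =====
-- from typing import Dict, List, Tuple
--
-- def infer_model_type(state_dict: Dict, cfg: Dict) -> str:
--     # Prefer explicit config
--     model_cfg = cfg.get("model", {}) if cfg else {}
--     if "type" in model_cfg:
--         return model_cfg["type"]
--     keys = state_dict.keys()
--     if any("bit_head" in k for k in keys) or any("gap_head" in k for k in keys):
--         return "multitask"
--     if any("count_head" in k for k in keys):
--         return "ctc_counts"
--     if any("pos_enc" in k for k in keys) or any("encoder.layers" in k for k in keys):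
--         return "transformer"
--     return "ctc"
-- ===== SOURCE B (Python) =====
-- _MARKERS = [
--     ("bit_head", "multitask"),
--     ("gap_head", "multitask"),
--     ("count_head", "ctc_counts"),
--     ("pos_enc", "transformer"),
--     ("encoder.layers", "transformer"),
-- ]
--
-- def _rank(key):
--     # priority rank of a key: index of the first marker it contains, else len(_MARKERS)
--     for i, (marker, _) in enumerate(_MARKERS):
--         if marker in key:
--             return i
--     return len(_MARKERS)
--
-- def infer_model_type(state_dict, cfg):
--     # Prefer explicit config (same short-circuit as the original)
--     model_cfg = cfg.get("model", {}) if cfg else {}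
--     if "type" in model_cfg:
--         return model_cfg["type"]
--     # reduce: smallest marker rank over all keys decides the model type
--     best = len(_MARKERS)
--     for k in state_dict.keys():
--         best = min(best, _rank(k))
--     return _MARKERS[best][1] if best < len(_MARKERS) else "ctc"
-- ===== Notes on version B (the rewrite author's own statement) =====
-- stated objective: alternative
-- what changed: Replaces A's cascade of six short-circuiting any() scans with a priority marker table: each key is mapped to the rank of the first marker it contains, the ranks are reduced with min, and the answer is looked up in the table at the minimal rank.
import Mathlib
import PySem

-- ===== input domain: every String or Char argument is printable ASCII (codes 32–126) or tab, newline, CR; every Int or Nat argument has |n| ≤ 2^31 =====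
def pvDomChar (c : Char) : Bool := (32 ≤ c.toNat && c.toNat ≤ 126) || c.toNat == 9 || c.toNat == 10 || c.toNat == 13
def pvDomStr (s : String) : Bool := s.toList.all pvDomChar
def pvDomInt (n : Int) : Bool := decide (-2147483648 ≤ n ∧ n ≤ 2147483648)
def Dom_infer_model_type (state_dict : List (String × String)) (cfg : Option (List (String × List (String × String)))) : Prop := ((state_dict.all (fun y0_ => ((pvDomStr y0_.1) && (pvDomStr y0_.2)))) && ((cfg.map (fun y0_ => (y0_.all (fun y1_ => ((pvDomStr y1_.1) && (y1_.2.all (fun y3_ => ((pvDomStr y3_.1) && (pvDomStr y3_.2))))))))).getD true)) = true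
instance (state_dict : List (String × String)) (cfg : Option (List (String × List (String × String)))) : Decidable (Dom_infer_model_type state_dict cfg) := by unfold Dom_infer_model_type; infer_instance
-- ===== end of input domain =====

-- B replaces A's cascade of any() scans with a priority marker table: each key gets the
-- rank of the first marker it contains, the ranks are min-reduced, and the answer is the
-- table entry at the minimal rank (alternative decomposition, same cost).

-- shared helper: the 'model_cfg = cfg.get("model", {}) if cfg else {}' line, identical in A and B
def pvModelCfg (cfg : Option (List (String × List (String × String)))) : List (String × String) :=
  match cfg with
  | some l => if l.isEmpty then [] else ((PySem.Dict.mk l).get? "model").getD []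
  | none => []

-- ===== PORT A =====
def infer_model_type (state_dict : List (String × String)) (cfg : Option (List (String × List (String × String)))) : String :=
  match (PySem.Dict.mk (pvModelCfg cfg)).get? "type" with
  | some t => t
  | none =>
    let keys := state_dict.map Prod.fst
    if keys.any (fun k => PySem.Str.isIn "bit_head" k) || keys.any (fun k => PySem.Str.isIn "gap_head" k) then "multitask"
    else if keys.any (fun k => PySem.Str.isIn "count_head" k) then "ctc_counts"
    else if keys.any (fun k => PySem.Str.isIn "pos_enc" k) || keys.any (fun k => PySem.Str.isIn "encoder.layers" k) then "transformer"
    else "ctc"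

-- ===== PORT B =====
-- the _MARKERS table
def pvMarkers : List (String × String) :=
  [("bit_head", "multitask"), ("gap_head", "multitask"), ("count_head", "ctc_counts"),
   ("pos_enc", "transformer"), ("encoder.layers", "transformer")]

-- _rank's enumerate loop with early return; the fall-through returns len(_MARKERS) = 5
def pvRankAux (ms : List (String × String)) (i : Nat) (key : String) : Nat :=
  match ms with
  | [] => 5
  | m :: rest => if PySem.Str.isIn m.1 key then i else pvRankAux rest (i + 1) key

def pvRank (key : String) : Nat := pvRankAux pvMarkers 0 key

def infer_model_type_alt (state_dict : List (String × String)) (cfg : Option (List (String × List (String × String)))) : String :=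
  match (PySem.Dict.mk (pvModelCfg cfg)).get? "type" with
  | some t => t
  | none =>
    let best := state_dict.foldl (fun b kv => min b (pvRank kv.1)) 5
    if best < 5 then (pvMarkers.map Prod.snd).getD best "ctc" else "ctc"

-- ===== PRECONDITION & SPEC =====
def Spec_infer_model_type (state_dict : List (String × String)) (cfg : Option (List (String × List (String × String)))) (out : String) : Prop := out = infer_model_type_alt state_dict cfg
instance (state_dict : List (String × String)) (cfg : Option (List (String × List (String × String)))) (out : String) : Decidable (Spec_infer_model_type state_dict cfg out) := by unfold Spec_infer_model_type; infer_instance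

-- ===== CLAIM (what is proved, stated in full; the proofs are below) =====
def Claim_equal_infer_model_type : Prop := ∀ (state_dict : List (String × String)) (cfg : Option (List (String × List (String × String)))), Dom_infer_model_type state_dict cfg → Spec_infer_model_type state_dict cfg (infer_model_type state_dict cfg)

-- ===== LEMMAS AND PROOFS =====

-- the least marker index among five flags (5 if none set)
def pvChain (a0 a1 a2 a3 a4 : Bool) : Nat :=
  if a0 then 0 else if a1 then 1 else if a2 then 2 else if a3 then 3 else if a4 then 4 else 5

theorem pvRank_eq (k : String) :
    pvRank k = pvChain (PySem.Str.isIn "bit_head" k) (PySem.Str.isIn "gap_head" k)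
      (PySem.Str.isIn "count_head" k) (PySem.Str.isIn "pos_enc" k)
      (PySem.Str.isIn "encoder.layers" k) := by
  simp only [pvRank, pvMarkers, pvRankAux, pvChain]

theorem pvChain_min (b0 b1 b2 b3 b4 a0 a1 a2 a3 a4 : Bool) :
    min (pvChain b0 b1 b2 b3 b4) (pvChain a0 a1 a2 a3 a4)
      = pvChain (b0 || a0) (b1 || a1) (b2 || a2) (b3 || a3) (b4 || a4) := by
  revert b0 b1 b2 b3 b4 a0 a1 a2 a3 a4; decide

theorem pvFold_chain (sd : List (String × String)) (acc : Nat) (h : acc ≤ 5) :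
    sd.foldl (fun b kv => min b (pvRank kv.1)) acc
      = min acc (pvChain (sd.any (fun kv => PySem.Str.isIn "bit_head" kv.1))
          (sd.any (fun kv => PySem.Str.isIn "gap_head" kv.1))
          (sd.any (fun kv => PySem.Str.isIn "count_head" kv.1))
          (sd.any (fun kv => PySem.Str.isIn "pos_enc" kv.1))
          (sd.any (fun kv => PySem.Str.isIn "encoder.layers" kv.1))) := by
  induction sd generalizing acc with
  | nil => simp [pvChain]; omega
  | cons hd tl ih =>
    simp only [List.foldl_cons, List.any_cons]
    rw [ih (min acc (pvRank hd.1)) (le_trans (min_le_left _ _) h)]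
    rw [pvRank_eq, min_assoc, pvChain_min]

theorem pvFinal (a0 a1 a2 a3 a4 : Bool) :
    (if a0 || a1 then "multitask"
     else if a2 then "ctc_counts"
     else if a3 || a4 then "transformer"
     else "ctc")
      = (if pvChain a0 a1 a2 a3 a4 < 5
         then (pvMarkers.map Prod.snd).getD (pvChain a0 a1 a2 a3 a4) "ctc" else "ctc") := by
  revert a0 a1 a2 a3 a4; decide

theorem pvChain_le (a0 a1 a2 a3 a4 : Bool) : pvChain a0 a1 a2 a3 a4 ≤ 5 := by
  revert a0 a1 a2 a3 a4; decide

-- ===== VERDICT (by name: the statement is the Claim_ definition above) =====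
theorem infer_model_type_spec : Claim_equal_infer_model_type := by
  intro sd cfg _
  show infer_model_type sd cfg = infer_model_type_alt sd cfg
  simp only [infer_model_type, infer_model_type_alt]
  cases h : (PySem.Dict.mk (pvModelCfg cfg)).get? "type" with
  | some t => rfl
  | none =>
    rw [pvFold_chain sd 5 (le_refl 5),
      min_eq_right (pvChain_le _ _ _ _ _)]
    simp only [List.any_map, Function.comp_def]
    exact pvFinal _ _ _ _ _
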